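-- pv_equiv track=rewrite | github.com/manwar/perlweeklychallenge-club | challenge-097/lubos-kolouch/python/ch-2.py | min_flips_to_equal_substrings
-- ===== SOURCE A (Python) =====
-- def min_flips_to_equal_substrings(binary: str, size: int) -> int:
--     """Return the minimum flips to make all length-`size` chunks equal."""
--     if size <= 0:
--         raise ValueError("size must be positive")
--     if len(binary) % size != 0:
--         raise ValueError("binary length must be a multiple of size")
--
--     chunks = [binary[i : i + size] for i in range(0, len(binary), size)]
--     flips = 0
--     for pos in range(size):
--         ones = sum(1 for chunk in chunks if chunk[pos] == "1")
--         flips += min(ones, len(chunks) - ones)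
--     return flips
-- ===== SOURCE B (Python) =====
-- def min_flips_to_equal_substrings(binary: str, size: int) -> int:
--     """Return the minimum flips to make all length-`size` chunks equal."""
--     if size <= 0:
--         raise ValueError("size must be positive")
--     if len(binary) % size != 0:
--         raise ValueError("binary length must be a multiple of size")
--
--     # Signed balance per column: +1 for '1', -1 for '0'.  With m chunks and c
--     # ones in a column, bal = 2c - m and min(c, m - c) = (m - |bal|) // 2, so
--     # the total is (len(binary) - sum(|bal|)) // 2 -- no min, no chunk count.
--     bal = [0] * size
--     for start in range(0, len(binary), size):
--         bal = [b + 1 if binary[start + j] == "1" else b - 1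
--                for j, b in enumerate(bal)]
--     return (len(binary) - sum(abs(b) for b in bal)) // 2
-- ===== Notes on version B (the rewrite author's own statement) =====
-- stated objective: alternative
-- what changed: Instead of counting ones per column and summing min(ones, chunks-ones), B folds a signed per-column balance vector (+1/-1) over the chunks and evaluates the closed form (len(binary) - sum(|bal|)) // 2, correct because min(c, m-c) = (m - |2c-m|)/2.
import Mathlib
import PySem

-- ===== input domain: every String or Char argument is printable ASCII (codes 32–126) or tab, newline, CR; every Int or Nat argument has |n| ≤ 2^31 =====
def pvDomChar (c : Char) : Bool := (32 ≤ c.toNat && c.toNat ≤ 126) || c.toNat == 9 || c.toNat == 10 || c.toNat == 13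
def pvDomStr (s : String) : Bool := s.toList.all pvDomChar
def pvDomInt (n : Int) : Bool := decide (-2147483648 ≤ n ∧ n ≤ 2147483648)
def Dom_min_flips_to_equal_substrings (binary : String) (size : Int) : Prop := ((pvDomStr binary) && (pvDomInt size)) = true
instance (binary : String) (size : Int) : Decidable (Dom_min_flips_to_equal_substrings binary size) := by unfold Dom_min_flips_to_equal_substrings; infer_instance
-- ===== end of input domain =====

-- B replaces A's per-column one-counts and min(ones, chunks-ones) sums by a signed
-- per-column balance vector (+1/-1) folded over the chunks and the closed form
-- (len - sum |bal|) // 2 (alternative algorithm, same cost).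


-- ===== PORT A =====
def min_flips_to_equal_substrings (binary : String) (size : Int) : Int :=
  let l := binary.toList
  let chunks := (PySem.List.pyRange 0 (l.length : Int) size).map
      (fun i => PySem.List.slice l (some i) (some (i + size)))
  (PySem.List.pyRange 0 size 1).foldl
    (fun flips pos =>
      let ones : Int := (chunks.countP (fun chunk => PySem.List.pyGet? chunk pos == some '1') : Int)
      flips + min ones ((chunks.length : Int) - ones))
    0

-- ===== PORT B =====
def min_flips_to_equal_substrings_alt (binary : String) (size : Int) : Int :=
  let l := binary.toList
  let bal := (PySem.List.pyRange 0 (l.length : Int) size).foldl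
    (fun bal start =>
      (PySem.List.enumerate bal 0).map
        (fun jb => if PySem.List.pyGet? l (start + jb.1) == some '1' then jb.2 + 1 else jb.2 - 1))
    (List.replicate size.toNat (0 : Int))
  PySem.Int.floordiv ((l.length : Int) - (bal.map (fun b => |b|)).sum) 2

-- ===== PRECONDITION & SPEC =====
-- A raises ValueError when size ≤ 0 or when len(binary) is not a multiple of size; exactly those inputs are excluded.
def Pre_min_flips_to_equal_substrings (binary : String) (size : Int) : Prop :=
  0 < size ∧ PySem.Int.mod (PySem.Str.len binary) size = 0
instance (binary : String) (size : Int) : Decidable (Pre_min_flips_to_equal_substrings binary size) := by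
  unfold Pre_min_flips_to_equal_substrings; infer_instance

def pvWitness_min_flips_to_equal_substrings : String × Int := ("110100", 2)

def Spec_min_flips_to_equal_substrings (binary : String) (size : Int) (out : Int) : Prop := out = min_flips_to_equal_substrings_alt binary size
instance (binary : String) (size : Int) (out : Int) : Decidable (Spec_min_flips_to_equal_substrings binary size out) := by unfold Spec_min_flips_to_equal_substrings; infer_instance

-- ===== CLAIM (what is proved, stated in full; the proofs are below) =====
def Claim_equal_min_flips_to_equal_substrings : Prop := ∀ (binary : String) (size : Int), Dom_min_flips_to_equal_substrings binary size → Pre_min_flips_to_equal_substrings binary size → Spec_min_flips_to_equal_substrings binary size (min_flips_to_equal_substrings binary size)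

-- ===== LEMMAS AND PROOFS =====

-- number of '1's among the first M column-p entries of l (chunk width s)
def pvCnt (l : List Char) (s M p : Nat) : Int :=
  ((List.range M).countP (fun q => l.getD (q * s + p) 'x' = '1') : Int)

lemma pvCnt_succ (l : List Char) (s M p : Nat) :
    pvCnt l s (M + 1) p =
      pvCnt l s M p + (if l.getD (M * s + p) 'x' = '1' then 1 else 0) := by
  unfold pvCnt
  rw [List.range_succ, List.countP_append]
  push_cast
  rcases hc : decide (l.getD (M * s + p) 'x' = '1') with _ | _ <;>
    simp_all

lemma pvCnt_nonneg (l : List Char) (s M p : Nat) : 0 ≤ pvCnt l s M p := by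
  unfold pvCnt; positivity

lemma pvCnt_le (l : List Char) (s M p : Nat) : pvCnt l s M p ≤ (M : Int) := by
  unfold pvCnt
  exact_mod_cast List.countP_le_length.trans_eq List.length_range

-- mapping B's comprehension over an enumerated (range s).map f table acts pointwise
lemma enum_map_range (s : Nat) (f : Nat → Int) (g : Int → Int → Int) :
    (PySem.List.enumerate ((List.range s).map f) 0).map (fun jb => g jb.1 jb.2)
      = (List.range s).map (fun p : Nat => g (p : Int) (f p)) := by
  apply List.ext_getElem
  · simp [PySem.List.length_enumerate]
  · intro k h1 h2
    rw [List.getElem_map, PySem.List.getElem_enumerate, List.getElem_map, List.getElem_range,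
      List.getElem_map, List.getElem_range]
    norm_num

theorem min_flips_to_equal_substrings_spec : Claim_equal_min_flips_to_equal_substrings := by
  intro binary size hdom hpre
  obtain ⟨hs, hmod⟩ := hpre
  unfold Spec_min_flips_to_equal_substrings
  unfold min_flips_to_equal_substrings min_flips_to_equal_substrings_alt
  dsimp only
  set l := binary.toList with hldef
  set s := size.toNat with hsdef
  have hsize : size = (s : Int) := (Int.toNat_of_nonneg (le_of_lt hs)).symm
  rw [hsize]
  have hs0 : 0 < s := by omega
  have hdvd : s ∣ l.length := by
    rw [PySem.Int.mod_eq_zero_iff_dvd, PySem.Str.len_eq, hsize] at hmod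
    exact_mod_cast hmod
  obtain ⟨m, hm⟩ := hdvd
  have hml : l.length = m * s := by rw [hm]; ring
  -- the shared list of chunk starts: pyRange 0 len s = [s*0, s*1, …, s*(m-1)]
  have hcnt : (if (0 : Int) < (l.length : Int) then
      (((l.length : Int) - 0 + (s : Int) - 1) / (s : Int)).toNat else 0) = m := by
    by_cases hl0 : l.length = 0
    · have : m = 0 := by
        rcases Nat.mul_eq_zero.mp (by omega : m * s = 0) with h | h
        · exact h
        · omega
      simp [hl0, this]
    · rw [if_pos (by exact_mod_cast Nat.pos_of_ne_zero hl0)]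
      have harith : ((l.length : Int) - 0 + (s : Int) - 1) = ((s : Int) - 1) + (m : Int) * (s : Int) := by
        rw [hml]; push_cast; ring
      rw [harith, Int.add_mul_ediv_right _ _ (by exact_mod_cast hs0.ne')]
      rw [Int.ediv_eq_zero_of_lt (by omega) (by omega)]
      simp
  have hstarts : PySem.List.pyRange 0 (l.length : Int) (s : Int)
      = (List.range m).map (fun q : Nat => 0 + (s : Int) * (q : Int)) := by
    rw [PySem.List.pyRange_of_pos 0 (l.length : Int) (by exact_mod_cast hs0), hcnt]
  -- A side: the chunk list
  have hchunks : (PySem.List.pyRange 0 (l.length : Int) (s : Int)).map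
      (fun i => PySem.List.slice l (some i) (some (i + (s : Int)))) =
      (List.range m).map (fun q => (l.drop (q * s)).take s) := by
    rw [hstarts, List.map_map]
    apply List.map_congr_left
    intro q hq
    show PySem.List.slice l (some (0 + (s : Int) * (q : Int)))
        (some (0 + (s : Int) * (q : Int) + (s : Int))) = (l.drop (q * s)).take s
    have h1 : (0 : Int) + (s : Int) * (q : Int) = ((q * s : Nat) : Int) := by push_cast; ring
    rw [h1]
    exact PySem.List.slice_natCast_add l (q * s) s
  rw [hchunks]
  -- B side: the balance fold over the chunk starts
  have hbal : ∀ M : Nat, M ≤ m →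
      (((List.range M).map (fun q : Nat => 0 + (s : Int) * (q : Int))).foldl
        (fun bal start =>
          (PySem.List.enumerate bal 0).map
            (fun jb => if PySem.List.pyGet? l (start + jb.1) == some '1' then jb.2 + 1 else jb.2 - 1))
        (List.replicate s (0 : Int)))
      = (List.range s).map (fun p => 2 * pvCnt l s M p - (M : Int)) := by
    intro M
    induction M with
    | zero =>
        intro _
        apply List.ext_getElem (by simp)
        intro k h1 h2
        simp [pvCnt]
    | succ M ih =>
        intro hMm
        rw [List.range_succ, List.map_append, List.foldl_append, ih (by omega)]
        simp only [List.map_cons, List.map_nil, List.foldl_cons, List.foldl_nil]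
        rw [enum_map_range s (fun p => 2 * pvCnt l s M p - (M : Int))
          (fun j b => if PySem.List.pyGet? l (0 + (s : Int) * (M : Int) + j) == some '1' then b + 1 else b - 1)]
        apply List.map_congr_left
        intro p hp
        rw [List.mem_range] at hp
        have hidx : (0 : Int) + (s : Int) * (M : Int) + (p : Int) = ((M * s + p : Nat) : Int) := by
          push_cast; ring
        have hin : M * s + p < l.length := by
          rw [hml]
          have h2 : (M + 1) * s ≤ m * s := Nat.mul_le_mul_right s (by omega)
          rw [add_mul, one_mul] at h2
          omega
        rw [hidx, PySem.List.pyGet?_natCast, List.getElem?_eq_getElem hin]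
        rw [pvCnt_succ]
        have hgd : l.getD (M * s + p) 'x' = l[M * s + p] := by
          rw [List.getD, List.getElem?_eq_getElem hin]; rfl
        rw [hgd]
        by_cases hc : l[M * s + p] = '1'
        · rw [if_pos (by simp [hc]), if_pos hc]; push_cast; ring
        · rw [if_neg (by simp [hc]), if_neg hc]; push_cast; ring
  rw [hstarts, hbal m (le_refl m)]
  -- the chunk count on A's side
  have hlen : ((List.range m).map (fun q => (l.drop (q * s)).take s)).length = m := by simp
  -- A's countP per column equals pvCnt
  have hcount : ∀ k : Nat, k < s →
      (((List.range m).map (fun q => (l.drop (q * s)).take s)).countP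
        (fun chunk => PySem.List.pyGet? chunk (0 + (k : Int)) == some '1') : Int) = pvCnt l s m k := by
    intro k hk
    unfold pvCnt
    rw [List.countP_map]
    congr 1
    apply List.countP_congr
    intro q hq
    rw [List.mem_range] at hq
    have h1 : q * s + s ≤ m * s := by
      have := Nat.mul_le_mul_right s (show q + 1 ≤ m by omega)
      rw [add_mul, one_mul] at this
      exact this
    have hql : ((l.drop (q * s)).take s).length = s := by
      rw [List.length_take, List.length_drop, hml]; omega
    have hkin : k < ((l.drop (q * s)).take s).length := by omega
    show (PySem.List.pyGet? ((l.drop (q * s)).take s) (0 + (k : Int)) == some '1') = true ↔ _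
    rw [show (0 : Int) + (k : Int) = ((k : Nat) : Int) by ring, PySem.List.pyGet?_natCast,
      List.getElem?_eq_getElem hkin]
    have hel : ((l.drop (q * s)).take s)[k] = l.getD (q * s + k) 'x' := by
      rw [List.getElem_take, List.getElem_drop, List.getD,
        List.getElem?_eq_getElem (by rw [hml]; omega)]
      rfl
    simp [hel]
  -- A's outer loop is a sum over range s
  rw [PySem.List.pyRange_one]
  have hto : ((s : Int) - 0).toNat = s := by omega
  rw [hto]
  simp only [List.foldl_map]
  rw [PySem.List.foldl_add, List.map_map, zero_add]
  have hA : ∀ y ∈ List.range s,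
      min ((((List.range m).map (fun q => (l.drop (q * s)).take s)).countP
            (fun chunk => PySem.List.pyGet? chunk (0 + (y : Int)) == some '1') : Int))
          ((((List.range m).map (fun q => (l.drop (q * s)).take s)).length : Int) -
            (((List.range m).map (fun q => (l.drop (q * s)).take s)).countP
              (fun chunk => PySem.List.pyGet? chunk (0 + (y : Int)) == some '1') : Int))
        = min (pvCnt l s m y) ((m : Int) - pvCnt l s m y) := by
    intro y hy
    rw [List.mem_range] at hy
    rw [hcount y hy, hlen]
  rw [List.map_congr_left hA]
  have habs : ∀ p ∈ List.range s,
      ((fun b => |b|) ∘ fun p => 2 * pvCnt l s m p - (m : Int)) p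
        = (m : Int) + (-2) * min (pvCnt l s m p) ((m : Int) - pvCnt l s m p) := by
    intro p _
    simp only [Function.comp_apply]
    have h0 := pvCnt_nonneg l s m p
    have h1 := pvCnt_le l s m p
    rcases le_total (2 * pvCnt l s m p) (m : Int) with h | h
    · rw [abs_of_nonpos (by omega), min_eq_left (by omega)]; ring
    · rw [abs_of_nonneg (by omega), min_eq_right (by omega)]; ring
  rw [List.map_congr_left habs]
  set G : Int := ((List.range s).map (fun p => min (pvCnt l s m p) ((m : Int) - pvCnt l s m p))).sum with hG
  have hsum : ((List.range s).map
      (fun p => (m : Int) + (-2) * min (pvCnt l s m p) ((m : Int) - pvCnt l s m p))).sum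
      = (s : Int) * (m : Int) + (-2) * G := by
    rw [PySem.List.sum_map_add_int, List.sum_map_mul_left, hG]
    congr 1
    simp [mul_comm]
  rw [hsum]
  have harg : (l.length : Int) - ((s : Int) * (m : Int) + (-2) * G) = 2 * G := by
    rw [hml]; push_cast; ring
  rw [harg, PySem.Int.floordiv_eq_ediv_of_pos (by norm_num)]
  exact (Int.mul_ediv_cancel_left _ (by norm_num)).symm
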